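-- pv_equiv track=rewrite | github.com/icoding2016/study | PY/algorithm/dp.py | robot_in_grid_memo
-- ===== SOURCE A (Python) =====
-- class InvalidInputException(Exception):
--     pass
--
-- def robot_in_grid_memo(grid:list[list],r:int,c:int, paths_memo:dict[tuple:list[list[tuple]]]=None) -> dict[list[list[tuple]]]:
--     if not grid or r >= len(grid) or c >= len(grid[0]):
--         raise InvalidInputException()
--     if paths_memo == None:
--         paths_memo = {}
--
--     if r == len(grid)-1 and c == len(grid[0])-1:
--         paths_memo[(c, r)] = [[(c, r)]]
--         return paths_memo
--
--     if not grid[r][c]:    # skip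
--         return paths_memo
--     if (c, r) in paths_memo:  # visited
--         return paths_memo
--
--     paths_memo[(c, r)] = []
--     if r < len(grid)-1:       # can go down
--         robot_in_grid_memo(grid, r+1, c, paths_memo)
--     if c < len(grid[0])-1:    # can go right
--         robot_in_grid_memo(grid, r, c+1, paths_memo)
--
--     if (c, r+1) in paths_memo:
--         for path in paths_memo[(c, r+1)]:
--             paths_memo[(c, r)].append([(c, r)] + path)
--     if (c+1, r) in paths_memo:
--         for path in paths_memo[(c+1, r)]:
--             paths_memo[(c, r)].append([(c, r)] + path)
--     return paths_memo
-- ===== SOURCE B (Python) =====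
-- class InvalidInputException(Exception):
--     pass
--
-- def robot_in_grid_memo(grid, r, c, paths_memo=None):
--     # Iterative explicit-stack post-order traversal instead of recursion.
--     if not grid or r >= len(grid) or c >= len(grid[0]):
--         raise InvalidInputException()
--     if paths_memo is None:
--         paths_memo = {}
--     stack = [(r, c, False)]
--     while stack:
--         rr, cc, expanded = stack.pop()
--         if expanded:
--             res = []
--             for nbr in ((cc, rr + 1), (cc + 1, rr)):
--                 for path in paths_memo.get(nbr, ()):
--                     res.append([(cc, rr)] + path)
--             paths_memo[(cc, rr)] = res
--             continue
--         if rr == len(grid) - 1 and cc == len(grid[0]) - 1: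
--             paths_memo[(cc, rr)] = [[(cc, rr)]]
--             continue
--         if not grid[rr][cc] or (cc, rr) in paths_memo:
--             continue
--         paths_memo[(cc, rr)] = []
--         stack.append((rr, cc, True))
--         if cc < len(grid[0]) - 1:
--             stack.append((rr, cc + 1, False))
--         if rr < len(grid) - 1:
--             stack.append((rr + 1, cc, False))
--     return paths_memo
-- ===== Notes on version B (the rewrite author's own statement) =====
-- stated objective: alternative
-- what changed: The recursive memoized DFS is replaced by an iterative post-order traversal over an explicit stack of (row, col, expanded) frames, building each cell's entry after its down- and right-neighbour frames resolve.
-- outside the precondition, e.g. on robot_in_grid_memo([[0, 1], [5]], 0, 0, None): A returns {}, B returns {}; on robot_in_grid_memo([[], []], 1, -1, None): A returns {(-1, 1): [[(-1, 1)]]}, B returns {(-1, 1): [[(-1, 1)]]}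
import Mathlib
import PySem

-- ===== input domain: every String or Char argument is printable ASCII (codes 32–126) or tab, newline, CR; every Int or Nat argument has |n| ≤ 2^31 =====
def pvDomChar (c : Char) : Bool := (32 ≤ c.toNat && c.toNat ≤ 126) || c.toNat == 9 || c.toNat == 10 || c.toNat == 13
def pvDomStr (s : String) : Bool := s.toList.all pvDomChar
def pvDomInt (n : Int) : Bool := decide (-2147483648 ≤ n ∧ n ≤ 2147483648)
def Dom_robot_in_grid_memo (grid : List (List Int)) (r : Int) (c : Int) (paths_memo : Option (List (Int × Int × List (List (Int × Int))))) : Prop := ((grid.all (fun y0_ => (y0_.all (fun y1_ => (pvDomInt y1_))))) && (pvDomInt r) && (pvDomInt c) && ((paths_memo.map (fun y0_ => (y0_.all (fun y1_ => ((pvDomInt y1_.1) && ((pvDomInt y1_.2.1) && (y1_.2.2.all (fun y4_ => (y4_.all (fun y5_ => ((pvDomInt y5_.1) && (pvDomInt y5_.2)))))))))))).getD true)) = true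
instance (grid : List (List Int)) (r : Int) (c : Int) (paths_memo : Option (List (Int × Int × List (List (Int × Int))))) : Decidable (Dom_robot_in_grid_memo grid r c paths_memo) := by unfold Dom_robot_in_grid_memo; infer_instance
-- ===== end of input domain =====

-- B replaces A's recursive DFS with an iterative explicit-stack post-order traversal (objective:
-- alternative decomposition; same asymptotic cost). Both A and B mutate the caller-supplied
-- paths_memo dict in place in Python; the equivalence proved here is about the returned dict.

-- boundary plumbing shared by both ports: Python dict ↔ association list of the required shape
def pvMemoIn (pm : Option (List (Int × Int × List (List (Int × Int))))) :
    PySem.Dict (Int × Int) (List (List (Int × Int))) :=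
  PySem.Dict.mk ((pm.getD []).map (fun t => ((t.1, t.2.1), t.2.2)))

def pvMemoOut (d : PySem.Dict (Int × Int) (List (List (Int × Int)))) :
    List (Int × Int × List (List (Int × Int))) :=
  d.items.map (fun p => (p.1.1, p.1.2, p.2))

-- termination measure lemmas for A's port (cited in its decreasing_by)
lemma pvDecDown (len L r c : Int) (hd : r < len - 1) (hg : ¬ c ≥ L) :
    ((len - 1 - (r + 1)) + (L - 1 - c)).toNat < ((len - 1 - r) + (L - 1 - c)).toNat := by
  omega

lemma pvDecRight (len L r c : Int) (hg : ¬ r ≥ len) (hr : c < L - 1) :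
    ((len - 1 - r) + (L - 1 - (c + 1))).toNat < ((len - 1 - r) + (L - 1 - c)).toNat := by
  omega

-- ===== PORT A =====
-- literal transliteration of A's recursive function (the first branch is where Python raises
-- InvalidInputException; Pre_ excludes it, the port returns the memo unchanged there)
def robotAuxA (grid : List (List Int)) (r c : Int)
    (m : PySem.Dict (Int × Int) (List (List (Int × Int)))) :
    PySem.Dict (Int × Int) (List (List (Int × Int))) :=
  if grid = [] ∨ r ≥ (grid.length : Int) ∨ c ≥ ((grid.headD []).length : Int) then m
  else if r = (grid.length : Int) - 1 ∧ c = ((grid.headD []).length : Int) - 1 then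
    m.insert (c, r) [[(c, r)]]
  else if ((PySem.List.pyGet? grid r).bind (fun row => PySem.List.pyGet? row c)).getD 0 = 0 then m
  else if m.contains (c, r) then m
  else
    let m1 := m.insert (c, r) ([] : List (List (Int × Int)))
    let m2 := if r < (grid.length : Int) - 1 then robotAuxA grid (r+1) c m1 else m1
    let m3 := if c < ((grid.headD []).length : Int) - 1 then robotAuxA grid r (c+1) m2 else m2
    let m4 := if m3.contains (c, r+1) then
        m3.insert (c, r) (m3.getD (c, r) [] ++ (m3.getD (c, r+1) []).map (fun p => (c, r) :: p))
      else m3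
    if m4.contains (c+1, r) then
      m4.insert (c, r) (m4.getD (c, r) [] ++ (m4.getD (c+1, r) []).map (fun p => (c, r) :: p))
    else m4
termination_by (((grid.length : Int) - 1 - r) + (((grid.headD []).length : Int) - 1 - c)).toNat
decreasing_by
  · rename_i hguard _h2x _h3x _h4x hdown
    exact pvDecDown _ _ _ _ hdown (not_or.mp (not_or.mp hguard).2).2
  · rename_i hguard _h2x _h3x _h4x hright
    exact pvDecRight _ _ _ _ (not_or.mp (not_or.mp hguard).2).1 hright

def robot_in_grid_memo (grid : List (List Int)) (r : Int) (c : Int)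
    (paths_memo : Option (List (Int × Int × List (List (Int × Int))))) :
    List (Int × Int × List (List (Int × Int))) :=
  pvMemoOut (robotAuxA grid r c (pvMemoIn paths_memo))

-- ===== PORT B =====
-- literal transliteration of B's while loop over an explicit stack; the fuel argument only makes
-- the loop total in Lean (it is proved sufficient on Pre_), frames are (row, col, expanded)
def robotLoopB (grid : List (List Int)) :
    Nat → List (Int × Int × Bool) → PySem.Dict (Int × Int) (List (List (Int × Int))) →
    Option (PySem.Dict (Int × Int) (List (List (Int × Int))))
  | _, [], m => some m
  | 0, _ :: _, _ => none
  | f + 1, (rr, cc, expanded) :: rest, m =>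
    if expanded then
      robotLoopB grid f rest (m.insert (cc, rr)
        ((m.getD (cc, rr+1) []).map (fun p => (cc, rr) :: p) ++
         (m.getD (cc+1, rr) []).map (fun p => (cc, rr) :: p)))
    else if rr = (grid.length : Int) - 1 ∧ cc = ((grid.headD []).length : Int) - 1 then
      robotLoopB grid f rest (m.insert (cc, rr) [[(cc, rr)]])
    else if ((PySem.List.pyGet? grid rr).bind (fun row => PySem.List.pyGet? row cc)).getD 0 = 0
            ∨ m.contains (cc, rr) then
      robotLoopB grid f rest m
    else
      let s1 : List (Int × Int × Bool) := (rr, cc, true) :: rest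
      let s2 := if cc < ((grid.headD []).length : Int) - 1 then (rr, cc+1, false) :: s1 else s1
      let s3 := if rr < (grid.length : Int) - 1 then (rr+1, cc, false) :: s2 else s2
      robotLoopB grid f s3 (m.insert (cc, rr) ([] : List (List (Int × Int))))

def robot_in_grid_memo_alt (grid : List (List Int)) (r : Int) (c : Int)
    (paths_memo : Option (List (Int × Int × List (List (Int × Int))))) :
    List (Int × Int × List (List (Int × Int))) :=
  -- Python raises InvalidInputException on the first branch; excluded by Pre_
  if grid = [] ∨ r ≥ (grid.length : Int) ∨ c ≥ ((grid.headD []).length : Int) then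
    pvMemoOut (pvMemoIn paths_memo)
  else
    match robotLoopB grid
        (2 ^ ((((grid.length : Int) - 1 - r) + (((grid.headD []).length : Int) - 1 - c)).toNat + 2))
        [(r, c, false)] (pvMemoIn paths_memo) with
    | some d => pvMemoOut d
    | none => pvMemoOut (pvMemoIn paths_memo)   -- fuel exhausted: unreachable under Pre_

-- ===== PRECONDITION & SPEC =====
-- Pre_ excludes: the inputs where A raises (empty grid / r,c past the end: InvalidInputException;
-- r,c below -len or a visited row shorter than row 0: IndexError). The row-length bound also
-- excludes some grids with a short row that A never visits (it returns there, see cites), and the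
-- Nodup condition excludes duplicate-key association lists, which no Python dict can produce.
def Pre_robot_in_grid_memo (grid : List (List Int)) (r : Int) (c : Int)
    (paths_memo : Option (List (Int × Int × List (List (Int × Int))))) : Prop :=
  grid ≠ [] ∧ r < (grid.length : Int) ∧ c < ((grid.headD []).length : Int) ∧
  -(grid.length : Int) ≤ r ∧ -((grid.headD []).length : Int) ≤ c ∧
  (∀ row ∈ grid, (grid.headD []).length ≤ row.length) ∧
  ((paths_memo.getD []).map (fun t => (t.1, t.2.1))).Nodup
instance (grid : List (List Int)) (r : Int) (c : Int) (paths_memo : Option (List (Int × Int × List (List (Int × Int))))) : Decidable (Pre_robot_in_grid_memo grid r c paths_memo) := by unfold Pre_robot_in_grid_memo; infer_instance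

def pvWitness_robot_in_grid_memo :
    List (List Int) × Int × Int × (Option (List (Int × Int × List (List (Int × Int))))) :=
  ([[1, 1], [0, 1]], 0, 0, none)

def Spec_robot_in_grid_memo (grid : List (List Int)) (r : Int) (c : Int) (paths_memo : Option (List (Int × Int × List (List (Int × Int))))) (out : List (Int × Int × List (List (Int × Int)))) : Prop := out = robot_in_grid_memo_alt grid r c paths_memo
instance (grid : List (List Int)) (r : Int) (c : Int) (paths_memo : Option (List (Int × Int × List (List (Int × Int))))) (out : List (Int × Int × List (List (Int × Int)))) : Decidable (Spec_robot_in_grid_memo grid r c paths_memo out) := by unfold Spec_robot_in_grid_memo; infer_instance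

-- ===== CLAIM (what is proved, stated in full; the proofs are below) =====
def Claim_equal_robot_in_grid_memo : Prop := ∀ (grid : List (List Int)) (r : Int) (c : Int) (paths_memo : Option (List (Int × Int × List (List (Int × Int))))), Dom_robot_in_grid_memo grid r c paths_memo → Pre_robot_in_grid_memo grid r c paths_memo → Spec_robot_in_grid_memo grid r c paths_memo (robot_in_grid_memo grid r c paths_memo)

-- ===== LEMMAS AND PROOFS =====

-- proof-side abbreviations for the tail of A's else-branch
def pvM3 (grid : List (List Int)) (r c : Int)
    (m : PySem.Dict (Int × Int) (List (List (Int × Int)))) :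
    PySem.Dict (Int × Int) (List (List (Int × Int))) :=
  let m1 := m.insert (c, r) ([] : List (List (Int × Int)))
  let m2 := if r < (grid.length : Int) - 1 then robotAuxA grid (r+1) c m1 else m1
  if c < ((grid.headD []).length : Int) - 1 then robotAuxA grid r (c+1) m2 else m2

def pvFin (r c : Int) (d : PySem.Dict (Int × Int) (List (List (Int × Int)))) :
    PySem.Dict (Int × Int) (List (List (Int × Int))) :=
  let m4 := if d.contains (c, r+1) then
      d.insert (c, r) (d.getD (c, r) [] ++ (d.getD (c, r+1) []).map (fun p => (c, r) :: p))
    else d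
  if m4.contains (c+1, r) then
    m4.insert (c, r) (m4.getD (c, r) [] ++ (m4.getD (c+1, r) []).map (fun p => (c, r) :: p))
  else m4

lemma robotAuxA_else (grid : List (List Int)) (r c : Int)
    (m : PySem.Dict (Int × Int) (List (List (Int × Int))))
    (h1 : ¬(grid = [] ∨ r ≥ (grid.length : Int) ∨ c ≥ ((grid.headD []).length : Int)))
    (h2 : ¬(r = (grid.length : Int) - 1 ∧ c = ((grid.headD []).length : Int) - 1))
    (h3 : ¬((PySem.List.pyGet? grid r).bind (fun row => PySem.List.pyGet? row c)).getD 0 = 0)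
    (h4 : ¬ m.contains (c, r) = true) :
    robotAuxA grid r c m = pvFin r c (pvM3 grid r c m) := by
  rw [robotAuxA]
  simp only [pvFin, pvM3, if_neg h1, if_neg h2, if_neg h3, if_neg h4]

lemma robotLoopB_mono (grid : List (List Int)) :
    ∀ (f f' : Nat) (s : List (Int × Int × Bool)) m d, f ≤ f' →
      robotLoopB grid f s m = some d → robotLoopB grid f' s m = some d := by
  intro f
  induction f with
  | zero =>
    intro f' s m d _ h
    cases s with
    | nil => simpa [robotLoopB] using h
    | cons a s => simp [robotLoopB] at h
  | succ f IH =>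
    intro f' s m d hle h
    cases s with
    | nil => simpa [robotLoopB] using h
    | cons fr s =>
      obtain ⟨rr, cc, ex⟩ := fr
      obtain ⟨f'', rfl⟩ : ∃ f'', f' = f'' + 1 := ⟨f' - 1, by omega⟩
      simp only [robotLoopB] at h ⊢
      split_ifs at h ⊢ <;> exact IH _ _ _ _ (by omega) h

lemma pvFin_get?_preserve (r c : Int) (d : PySem.Dict (Int × Int) (List (List (Int × Int))))
    (k : Int × Int) (hkne : k ≠ (c, r)) : (pvFin r c d).get? k = d.get? k := by
  simp only [pvFin]
  split_ifs <;>
    simp [PySem.Dict.get?_insert_of_ne _ _ hkne]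

lemma pvFin_nodup (r c : Int) (d : PySem.Dict (Int × Int) (List (List (Int × Int))))
    (h : d.keys.Nodup) : (pvFin r c d).keys.Nodup := by
  simp only [pvFin]
  split_ifs <;>
    simp [PySem.Dict.nodup_keys_insert, h]

-- A's recursion never touches a key strictly above/left of its cell
lemma robotAuxA_get?_preserve (grid : List (List Int)) (r c : Int)
    (m : PySem.Dict (Int × Int) (List (List (Int × Int)))) (k : Int × Int) :
    k.2 < r ∨ k.1 < c → (robotAuxA grid r c m).get? k = m.get? k := by
  induction r, c, m using robotAuxA.induct (grid := grid) with
  | case1 r c m h1 => intro _; rw [robotAuxA, if_pos h1]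
  | case2 r c m h1 h2 =>
    intro hk
    rw [robotAuxA, if_neg h1, if_pos h2]
    exact PySem.Dict.get?_insert_of_ne _ _ (by rintro rfl; rcases hk with h | h <;> simp at h)
  | case3 r c m h1 h2 h3 => intro _; rw [robotAuxA, if_neg h1, if_neg h2, if_pos h3]
  | case4 r c m h1 h2 h3 h4 => intro _; rw [robotAuxA, if_neg h1, if_neg h2, if_neg h3, if_pos h4]
  | case5 r c m h1 h2 h3 h4 _m1 _m2 _m3 _m4 h5 ih1 ih1' ih2 =>
    intro hk
    have hkne : k ≠ (c, r) := by rintro rfl; rcases hk with h | h <;> simp at h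
    simp only [_m2, _m1, dite_eq_ite] at ih1 ih2
    rw [robotAuxA_else grid r c m h1 h2 h3 h4, pvFin_get?_preserve r c _ k hkne]
    simp only [pvM3]
    by_cases hcc : c < ((grid.headD []).length : Int) - 1
    · rw [if_pos hcc, ih2 hcc (by rcases hk with h | h; exact Or.inl h; exact Or.inr (by omega))]
      by_cases hrr : r < (grid.length : Int) - 1
      · rw [if_pos hrr, ih1 hrr (by rcases hk with h | h; exact Or.inl (by omega); exact Or.inr h)]
        exact PySem.Dict.get?_insert_of_ne _ _ hkne
      · rw [if_neg hrr]; exact PySem.Dict.get?_insert_of_ne _ _ hkne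
    · rw [if_neg hcc]
      by_cases hrr : r < (grid.length : Int) - 1
      · rw [if_pos hrr, ih1 hrr (by rcases hk with h | h; exact Or.inl (by omega); exact Or.inr h)]
        exact PySem.Dict.get?_insert_of_ne _ _ hkne
      · rw [if_neg hrr]; exact PySem.Dict.get?_insert_of_ne _ _ hkne
  | case6 r c m h1 h2 h3 h4 _m1 _m2 _m3 _m4 h5 ih1 ih1' ih2 =>
    intro hk
    have hkne : k ≠ (c, r) := by rintro rfl; rcases hk with h | h <;> simp at h
    simp only [_m2, _m1, dite_eq_ite] at ih1 ih2
    rw [robotAuxA_else grid r c m h1 h2 h3 h4, pvFin_get?_preserve r c _ k hkne]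
    simp only [pvM3]
    by_cases hcc : c < ((grid.headD []).length : Int) - 1
    · rw [if_pos hcc, ih2 hcc (by rcases hk with h | h; exact Or.inl h; exact Or.inr (by omega))]
      by_cases hrr : r < (grid.length : Int) - 1
      · rw [if_pos hrr, ih1 hrr (by rcases hk with h | h; exact Or.inl (by omega); exact Or.inr h)]
        exact PySem.Dict.get?_insert_of_ne _ _ hkne
      · rw [if_neg hrr]; exact PySem.Dict.get?_insert_of_ne _ _ hkne
    · rw [if_neg hcc]
      by_cases hrr : r < (grid.length : Int) - 1
      · rw [if_pos hrr, ih1 hrr (by rcases hk with h | h; exact Or.inl (by omega); exact Or.inr h)]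
        exact PySem.Dict.get?_insert_of_ne _ _ hkne
      · rw [if_neg hrr]; exact PySem.Dict.get?_insert_of_ne _ _ hkne

lemma robotAuxA_nodup (grid : List (List Int)) (r c : Int)
    (m : PySem.Dict (Int × Int) (List (List (Int × Int)))) :
    m.keys.Nodup → (robotAuxA grid r c m).keys.Nodup := by
  induction r, c, m using robotAuxA.induct (grid := grid) with
  | case1 r c m h1 => intro h; rwa [robotAuxA, if_pos h1]
  | case2 r c m h1 h2 =>
    intro h; rw [robotAuxA, if_neg h1, if_pos h2]
    exact PySem.Dict.nodup_keys_insert _ _ _ h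
  | case3 r c m h1 h2 h3 => intro h; rwa [robotAuxA, if_neg h1, if_neg h2, if_pos h3]
  | case4 r c m h1 h2 h3 h4 => intro h; rwa [robotAuxA, if_neg h1, if_neg h2, if_neg h3, if_pos h4]
  | case5 r c m h1 h2 h3 h4 _m1 _m2 _m3 _m4 h5 ih1 ih1' ih2 =>
    intro h
    simp only [_m2, _m1, dite_eq_ite] at ih1 ih2
    rw [robotAuxA_else grid r c m h1 h2 h3 h4]
    apply pvFin_nodup
    simp only [pvM3]
    have hm1 := PySem.Dict.nodup_keys_insert m (c, r) ([] : List (List (Int × Int))) h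
    by_cases hcc : c < ((grid.headD []).length : Int) - 1
    · rw [if_pos hcc]
      by_cases hrr : r < (grid.length : Int) - 1
      · rw [if_pos hrr] at ih2 ⊢; exact ih2 hcc (ih1 hrr hm1)
      · rw [if_neg hrr] at ih2 ⊢; exact ih2 hcc hm1
    · rw [if_neg hcc]
      by_cases hrr : r < (grid.length : Int) - 1
      · rw [if_pos hrr]; exact ih1 hrr hm1
      · rw [if_neg hrr]; exact hm1
  | case6 r c m h1 h2 h3 h4 _m1 _m2 _m3 _m4 h5 ih1 ih1' ih2 =>
    intro h
    simp only [_m2, _m1, dite_eq_ite] at ih1 ih2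
    rw [robotAuxA_else grid r c m h1 h2 h3 h4]
    apply pvFin_nodup
    simp only [pvM3]
    have hm1 := PySem.Dict.nodup_keys_insert m (c, r) ([] : List (List (Int × Int))) h
    by_cases hcc : c < ((grid.headD []).length : Int) - 1
    · rw [if_pos hcc]
      by_cases hrr : r < (grid.length : Int) - 1
      · rw [if_pos hrr] at ih2 ⊢; exact ih2 hcc (ih1 hrr hm1)
      · rw [if_neg hrr] at ih2 ⊢; exact ih2 hcc hm1
    · rw [if_neg hcc]
      by_cases hrr : r < (grid.length : Int) - 1
      · rw [if_pos hrr]; exact ih1 hrr hm1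
      · rw [if_neg hrr]; exact hm1

lemma map_overwrite_self {κ ν : Type} [BEq κ] [LawfulBEq κ] (k : κ) (v : ν) :
    ∀ l : List (κ × ν), (l.map Prod.fst).Nodup → (k, v) ∈ l →
      l.map (fun p => if (p.1 == k) = true then (k, v) else p) = l := by
  intro l
  induction l with
  | nil => intro _ h; simp at h
  | cons p l ih =>
    intro hnd hmem
    simp only [List.map_cons, List.nodup_cons, List.mem_map] at hnd
    obtain ⟨hnotin, hndl⟩ := hnd
    by_cases hpk : (p.1 == k) = true
    · have hp1 : p.1 = k := by simpa using hpk
      have hp : p = (k, v) := by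
        rcases List.mem_cons.mp hmem with h | h
        · exact h.symm
        · exact absurd ⟨(k, v), h, hp1 ▸ rfl⟩ hnotin
      subst hp
      simp only [List.map_cons]
      have hhead : (if ((((k, v) : κ × ν).1 == k) = true) then (k, v) else ((k, v) : κ × ν))
          = (k, v) := by split <;> rfl
      rw [hhead]
      congr 1
      have : ∀ q ∈ l, (if (q.1 == k) = true then (k, v) else q) = q := by
        intro q hq
        apply if_neg
        simp only [beq_iff_eq]
        intro hqk
        exact hnotin ⟨q, hq, by rw [hqk, ← hp1]⟩
      rw [List.map_congr_left this]
      simp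
    · have hmem' : (k, v) ∈ l := by
        rcases List.mem_cons.mp hmem with h | h
        · exact absurd (by rw [← h]; simp) hpk
        · exact h
      simp only [List.map_cons, if_neg hpk, ih hndl hmem']

-- re-inserting a key's present value is a no-op (keys unique)
lemma dict_insert_get?_self {κ ν : Type} [BEq κ] [LawfulBEq κ]
    (d : PySem.Dict κ ν) (k : κ) (v : ν)
    (hnd : d.keys.Nodup) (h : d.get? k = some v) : d.insert k v = d := by
  apply PySem.Dict.ext
  rw [PySem.Dict.items_insert_of_contains _ v
        (by rw [PySem.Dict.contains_eq_isSome_get?, h]; rfl)]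
  have hmem := PySem.Dict.mem_items_of_get?_eq_some d h
  have hnd' : (d.items.map Prod.fst).Nodup := by simpa [PySem.Dict.keys] using hnd
  exact map_overwrite_self k v d.items hnd' hmem

-- A's two conditional appends collapse to B's single unconditional insert
lemma pvFin_eq_insert (r c : Int) (d : PySem.Dict (Int × Int) (List (List (Int × Int))))
    (hnd : d.keys.Nodup) (h : d.get? (c, r) = some []) :
    pvFin r c d
    = d.insert (c, r) ((d.getD (c, r+1) []).map (fun p => (c, r) :: p) ++
                       (d.getD (c+1, r) []).map (fun p => (c, r) :: p)) := by
  have h2d : d.getD (c, r) [] = [] := PySem.Dict.getD_of_get?_eq_some _ _ h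
  have ne1 : ((c, r+1) : Int × Int) ≠ (c, r) := by simp
  have ne2 : ((c+1, r) : Int × Int) ≠ (c, r) := by simp
  simp only [pvFin]
  by_cases h5 : d.contains (c, r+1) = true
  · rw [if_pos h5]
    have hc6 : (d.insert (c, r)
        (d.getD (c, r) [] ++ (d.getD (c, r+1) []).map (fun p => (c, r) :: p))).contains (c+1, r)
        = d.contains (c+1, r) := by
      rw [PySem.Dict.contains_insert]
      simp
    by_cases h6 : d.contains (c+1, r) = true
    · rw [if_pos (hc6.trans h6)]
      rw [PySem.Dict.getD_insert_self, PySem.Dict.getD_insert_of_ne d _ _ ne2,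
          PySem.Dict.insert_insert_self, h2d]
      simp
    · rw [if_neg (by rw [hc6]; exact h6)]
      rw [h2d, PySem.Dict.getD_of_not_contains (k := (c+1, r)) d _ (by simpa using h6)]
      simp
  · rw [if_neg h5]
    have hdown : d.getD (c, r+1) [] = [] :=
      PySem.Dict.getD_of_not_contains (k := (c, r+1)) d _ (by simpa using h5)
    by_cases h6 : d.contains (c+1, r) = true
    · rw [if_pos h6, h2d, hdown]; simp
    · rw [if_neg h6, hdown,
          PySem.Dict.getD_of_not_contains (k := (c+1, r)) d _ (by simpa using h6)]
      simp only [List.map_nil, List.append_nil]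
      exact (dict_insert_get?_self d (c, r) [] hnd h).symm

-- the simulation: popping an unexpanded frame with enough fuel = one recursive call of A
lemma robotSim (grid : List (List Int)) (hg : grid ≠ []) :
    ∀ (n : Nat) (r c : Int),
      ((grid.length : Int) - 1 - r) + (((grid.headD []).length : Int) - 1 - c) = (n : Int) →
      r < (grid.length : Int) → c < ((grid.headD []).length : Int) →
      ∀ m rest f d, m.keys.Nodup →
        robotLoopB grid f rest (robotAuxA grid r c m) = some d →
        robotLoopB grid (f + (2 ^ (n + 2) - 2)) ((r, c, false) :: rest) m = some d := by
  intro n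
  induction n using Nat.strong_induction_on with
  | _ n IH =>
  intro r c hmeq hr hc m rest f d hnd hA
  have h1 : ¬(grid = [] ∨ r ≥ (grid.length : Int) ∨ c ≥ ((grid.headD []).length : Int)) := by
    push Not; exact ⟨hg, hr, hc⟩
  have hpow : (4 : Nat) ≤ 2 ^ (n + 2) := by
    calc (4 : Nat) = 2 ^ 2 := rfl
    _ ≤ 2 ^ (n + 2) := Nat.pow_le_pow_right (by norm_num) (by omega)
  have hstep : f + (2 ^ (n + 2) - 2) = (f + (2 ^ (n + 2) - 2) - 1) + 1 := by omega
  rw [hstep]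
  simp only [robotLoopB, Bool.false_eq_true, if_false]
  by_cases hdest : r = (grid.length : Int) - 1 ∧ c = ((grid.headD []).length : Int) - 1
  · rw [if_pos hdest]
    rw [robotAuxA, if_neg h1, if_pos hdest] at hA
    exact robotLoopB_mono grid f _ _ _ _ (by omega) hA
  · rw [if_neg hdest]
    by_cases hbv : ((PySem.List.pyGet? grid r).bind (fun row => PySem.List.pyGet? row c)).getD 0 = 0
        ∨ m.contains (c, r) = true
    · rw [if_pos hbv]
      rcases hbv with hb | hv
      · rw [robotAuxA, if_neg h1, if_neg hdest, if_pos hb] at hA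
        exact robotLoopB_mono grid f _ _ _ _ (by omega) hA
      · by_cases hb : ((PySem.List.pyGet? grid r).bind (fun row => PySem.List.pyGet? row c)).getD 0 = 0
        · rw [robotAuxA, if_neg h1, if_neg hdest, if_pos hb] at hA
          exact robotLoopB_mono grid f _ _ _ _ (by omega) hA
        · rw [robotAuxA, if_neg h1, if_neg hdest, if_neg hb, if_pos hv] at hA
          exact robotLoopB_mono grid f _ _ _ _ (by omega) hA
    · rw [if_neg hbv]
      push Not at hbv
      obtain ⟨hb, hv⟩ := hbv
      -- rewrite A's value through pvFin/pvM3
      have hnd1 : (m.insert (c, r) ([] : List (List (Int × Int)))).keys.Nodup :=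
        PySem.Dict.nodup_keys_insert _ _ _ hnd
      have hget3 : (pvM3 grid r c m).get? (c, r) = some [] := by
        simp only [pvM3]
        have hm2 : (if r < (grid.length : Int) - 1 then
            robotAuxA grid (r+1) c (m.insert (c, r) [])
            else m.insert (c, r) ([] : List (List (Int × Int)))).get? (c, r)
            = some [] := by
          split_ifs with hrr
          · rw [robotAuxA_get?_preserve grid (r+1) c _ (c, r)
                (Or.inl (show r < r + 1 by omega))]
            exact PySem.Dict.get?_insert_self _ _ _
          · exact PySem.Dict.get?_insert_self _ _ _
        by_cases hcc : c < ((grid.headD []).length : Int) - 1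
        · rw [if_pos hcc, robotAuxA_get?_preserve grid r (c+1) _ (c, r)
              (Or.inr (show c < c + 1 by omega))]
          exact hm2
        · rw [if_neg hcc]; exact hm2
      have hnd3 : (pvM3 grid r c m).keys.Nodup := by
        simp only [pvM3]
        split_ifs with hcc hrr hrr
        · exact robotAuxA_nodup _ _ _ _ (robotAuxA_nodup _ _ _ _ hnd1)
        · exact robotAuxA_nodup _ _ _ _ hnd1
        · exact robotAuxA_nodup _ _ _ _ hnd1
        · exact hnd1
      rw [robotAuxA_else grid r c m h1 hdest hb hv,
          pvFin_eq_insert r c _ hnd3 hget3] at hA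
      -- one expanded-frame step of the loop
      have hexp : ∀ g, robotLoopB grid g rest ((pvM3 grid r c m).insert (c, r)
            (((pvM3 grid r c m).getD (c, r+1) []).map (fun p => (c, r) :: p) ++
             ((pvM3 grid r c m).getD (c+1, r) []).map (fun p => (c, r) :: p))) = some d →
          robotLoopB grid (g + 1) ((r, c, true) :: rest) (pvM3 grid r c m) = some d := by
        intro g hyp
        simp only [robotLoopB]
        exact hyp
      by_cases hrr : r < (grid.length : Int) - 1
      · by_cases hcc : c < ((grid.headD []).length : Int) - 1
        · -- both children
          have hn2 : 2 ≤ n := by omega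
          have hp2 : 2 ^ (n + 2) = 2 * 2 ^ (n + 1) := by ring
          have hexp' := hexp f hA
          simp only [pvM3, if_pos hrr, if_pos hcc] at hexp'
          have hndm2 : (robotAuxA grid (r+1) c (m.insert (c, r) [])).keys.Nodup :=
            robotAuxA_nodup _ _ _ _ hnd1
          have h2 := IH (n - 1) (by omega) r (c+1) (by omega) hr (by omega)
            (robotAuxA grid (r+1) c (m.insert (c, r) [])) ((r, c, true) :: rest) (f + 1) d
            hndm2 hexp'
          have h3 := IH (n - 1) (by omega) (r+1) c (by omega) (by omega) hc
            (m.insert (c, r) []) ((r, c+1, false) :: (r, c, true) :: rest)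
            (f + 1 + (2 ^ (n - 1 + 2) - 2)) d hnd1 h2
          have he : n - 1 + 2 = n + 1 := by omega
          rw [he] at h3
          simp only [if_pos hrr, if_pos hcc]
          exact robotLoopB_mono grid _ _ _ _ _ (by omega) h3
        · -- down child only
          have hn1 : 1 ≤ n := by omega
          have hp2 : 2 ^ (n + 2) = 2 * 2 ^ (n + 1) := by ring
          have hexp' := hexp f hA
          simp only [pvM3, if_pos hrr, if_neg hcc] at hexp'
          have h3 := IH (n - 1) (by omega) (r+1) c (by omega) (by omega) hc
            (m.insert (c, r) []) ((r, c, true) :: rest) (f + 1) d hnd1 hexp'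
          have he : n - 1 + 2 = n + 1 := by omega
          rw [he] at h3
          simp only [if_pos hrr, if_neg hcc]
          exact robotLoopB_mono grid _ _ _ _ _ (by omega) h3
      · by_cases hcc : c < ((grid.headD []).length : Int) - 1
        · -- right child only
          have hn1 : 1 ≤ n := by omega
          have hp2 : 2 ^ (n + 2) = 2 * 2 ^ (n + 1) := by ring
          have hexp' := hexp f hA
          simp only [pvM3, if_neg hrr, if_pos hcc] at hexp'
          have h2 := IH (n - 1) (by omega) r (c+1) (by omega) hr (by omega)
            (m.insert (c, r) []) ((r, c, true) :: rest) (f + 1) d hnd1 hexp'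
          have he : n - 1 + 2 = n + 1 := by omega
          rw [he] at h2
          simp only [if_neg hrr, if_pos hcc]
          exact robotLoopB_mono grid _ _ _ _ _ (by omega) h2
        · exact absurd ⟨by omega, by omega⟩ hdest

-- ===== VERDICT (by name: the statement is the Claim_ definition above) =====
theorem robot_in_grid_memo_spec : Claim_equal_robot_in_grid_memo := by
  intro grid r c pm _ hpre
  obtain ⟨hg, hr, hc, hrl, hcl, hrow, hnodup⟩ := hpre
  unfold Spec_robot_in_grid_memo robot_in_grid_memo robot_in_grid_memo_alt
  have h1 : ¬(grid = [] ∨ r ≥ (grid.length : Int) ∨ c ≥ ((grid.headD []).length : Int)) := by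
    push Not; exact ⟨hg, hr, hc⟩
  rw [if_neg h1]
  have hnd0 : (pvMemoIn pm).keys.Nodup := by
    simpa [pvMemoIn, PySem.Dict.keys, List.map_map, Function.comp_def] using hnodup
  set n := (((grid.length : Int) - 1 - r) + (((grid.headD []).length : Int) - 1 - c)).toNat
    with hn
  have hmeq : ((grid.length : Int) - 1 - r) + (((grid.headD []).length : Int) - 1 - c)
      = (n : Int) := by rw [hn, Int.toNat_of_nonneg (by omega)]
  have hsim := robotSim grid hg n r c hmeq hr hc (pvMemoIn pm) [] 0
    (robotAuxA grid r c (pvMemoIn pm)) hnd0 (by simp [robotLoopB])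
  have hrun : robotLoopB grid (2 ^ (n + 2)) [(r, c, false)] (pvMemoIn pm)
      = some (robotAuxA grid r c (pvMemoIn pm)) :=
    robotLoopB_mono grid _ _ _ _ _ (by have := Nat.one_le_two_pow (n := n + 2); omega) hsim
  rw [hrun]
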